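-- pv_equiv track=rewrite | github.com/Camilo-6/SeptimoSemestre | Cr/Tareas/Tarea2/Ejercicio5/poli.py | div_poli
-- ===== SOURCE A (Python) =====
-- def suma_poli(f, g, p_n):
--     if f == [0]:
--         return g
--     if g == [0]:
--         return f
--     l_1 = len(f)
--     l_2 = len(g)
--     if l_1 < l_2:
--         f = [0] * (l_2 - l_1) + f
--     elif l_2 < l_1:
--         g = [0] * (l_1 - l_2) + g
--     resultado = [(f[i] + g[i]) % p_n for i in range(max(l_1, l_2))]
--     while resultado and resultado[0] == 0:
--         resultado.pop(0)
--     if resultado == []: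
--         resultado = [0]
--     return resultado
--
-- def resta_poli(f, g, p_n):
--     if g == [0]:
--         return f
--     l_1 = len(f)
--     l_2 = len(g)
--     if l_1 < l_2:
--         f = [0] * (l_2 - l_1) + f
--     elif l_2 < l_1:
--         g = [0] * (l_1 - l_2) + g
--     resultado = [(f[i] - g[i]) % p_n for i in range(max(l_1, l_2))]
--     while resultado and resultado[0] == 0:
--         resultado.pop(0)
--     if resultado == []:
--         resultado = [0]
--     return resultado
--
-- def mult_poli(f, g, p_n):
--     l_1 = len(f)
--     l_2 = len(g)
--     if f == [0] or g == [0]: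
--         return [0]
--     if f == [1]:
--         return g
--     if g == [1]:
--         return f
--     resultado = [0] * (l_1 + l_2 - 1)
--     for i in range(l_1):
--         for j in range(l_2):
--             resultado[i + j] += f[i] * g[j]
--     resultado = [x % p_n for x in resultado]
--     while resultado and resultado[0] == 0:
--         resultado.pop(0)
--     if resultado == []:
--         resultado = [0]
--     return resultado
--
-- def div_poli(f, g, p_n):
--     if g == [0]:
--         raise ValueError("No se puede dividir por 0")
--     q = [0]
--     r = f[:]
--     while r != [0] and len(r) >= len(g):
--         lead_r = r[0]
--         lead_g = g[0]
--         if lead_g == 0: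
--             raise ValueError("No se puede dividir por 0")
--         coef = lead_r * pow(lead_g, -1, p_n) % p_n
--         t = [coef] + [0] * (len(r) - len(g))
--         while t and t[0] == 0:
--             t.pop(0)
--         if t == []:
--             t = [0]
--         q = suma_poli(q, t, p_n)
--         aux = mult_poli(t, g, p_n)
--         r = resta_poli(r, aux, p_n)
--     return q, r
-- ===== SOURCE B (Python) =====
-- def div_poli(f, g, p_n):
--     if g == [0]:
--         raise ValueError("No se puede dividir por 0")
--     m = len(g)
--     if len(f) < m:
--         return [0], f[:]
--     inv = pow(g[0], -1, p_n)
--     r = [c % p_n for c in f]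
--     q = []
--     while len(r) >= m:
--         c = r[0] * inv % p_n
--         q.append(c)
--         tail = r[1:]
--         if c:
--             for j in range(1, m):
--                 tail[j - 1] = (tail[j - 1] - c * g[j]) % p_n
--         r = tail
--     while r and r[0] == 0:
--         r.pop(0)
--     if not r:
--         r = [0]
--     return q, r
-- ===== Notes on version B (the rewrite author's own statement) =====
-- stated objective: faster
-- what changed: Replaces A's per-step construction of a monomial and three full polynomial passes (suma_poli/mult_poli/resta_poli with padding and re-stripping) by in-place synthetic division: one upfront reduction of f mod p_n, then one O(deg g) subtraction of the scaled divisor per quotient coefficient.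
-- outside the precondition, e.g. on div_poli([0], [], 2): A returns ([0], [0]), B raises IndexError; on div_poli([0], [5], 10): A returns ([0], [0]), B raises ValueError
import Mathlib
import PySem

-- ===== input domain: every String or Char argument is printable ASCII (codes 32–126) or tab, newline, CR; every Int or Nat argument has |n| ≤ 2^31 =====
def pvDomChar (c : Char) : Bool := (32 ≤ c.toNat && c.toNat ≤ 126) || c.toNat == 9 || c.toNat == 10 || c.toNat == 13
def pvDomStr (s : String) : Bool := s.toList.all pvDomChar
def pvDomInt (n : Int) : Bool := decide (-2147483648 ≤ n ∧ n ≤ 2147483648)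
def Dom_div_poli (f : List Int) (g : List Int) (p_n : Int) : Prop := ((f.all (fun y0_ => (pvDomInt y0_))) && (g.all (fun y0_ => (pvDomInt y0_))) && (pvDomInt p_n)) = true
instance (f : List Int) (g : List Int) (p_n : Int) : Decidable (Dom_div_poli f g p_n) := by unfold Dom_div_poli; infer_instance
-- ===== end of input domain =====

-- B is synthetic division over Z/p_n: one upfront reduction of f, then one O(deg g) in-place
-- subtraction of the scaled divisor per quotient coefficient, instead of A's per-step
-- suma/mult/resta full-polynomial passes.  Equivalence is about the return value (neither
-- version mutates its arguments observably).

-- ===== PORT A =====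
-- shared helper: the `while resultado and resultado[0]==0: resultado.pop(0)` idiom
def stripZ : List Int → List Int
  | [] => []
  | x :: t => if x = 0 then stripZ t else x :: t

-- `... ; if resultado == []: resultado = [0]`
def normPoly (l : List Int) : List Int :=
  let s := stripZ l
  if s = [] then [0] else s

-- extended Euclid on Nat: egcd a b = (gcd a b, x, y) with x*a + y*b = gcd.
-- Structural fuel recursion (fuel = a is always enough: the first argument strictly decreases).
def egcdF : Nat → Nat → Nat → Int × Int × Int
  | 0, _, b => ((b : Int), 0, 1)
  | _ + 1, 0, b => ((b : Int), 0, 1)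
  | fuel + 1, a, b =>
    let r := egcdF fuel (b % a) a
    (r.1, r.2.2 - ((b : Int) / (a : Int)) * r.2.1, r.2.1)

def egcd (a b : Nat) : Int × Int × Int := egcdF a a b

-- pow(a, -1, p): exact for Python whenever Python returns (|p| ≥ 2, gcd(a,p) = 1 — guaranteed
-- by Pre_); where Python raises ValueError this returns 0 (those inputs are outside Pre_).
def pyInvMod (a p : Int) : Int :=
  let n := p.natAbs
  if n = 0 then 0
  else
    let a' := (PySem.Int.mod a (n : Int)).toNat
    let r := egcd a' n
    if r.1 = 1 then PySem.Int.mod r.2.1 p else 0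

def sumaPoli (f g : List Int) (p : Int) : List Int :=
  if f = [0] then g
  else if g = [0] then f
  else
    let l1 := f.length
    let l2 := g.length
    let f' := if l1 < l2 then List.replicate (l2 - l1) 0 ++ f else f
    let g' := if l2 < l1 then List.replicate (l1 - l2) 0 ++ g else g
    -- indices below are always in range (both lists have length max l1 l2)
    normPoly ((List.range (max l1 l2)).map (fun i => PySem.Int.mod (f'.getD i 0 + g'.getD i 0) p))

def restaPoli (f g : List Int) (p : Int) : List Int :=
  if g = [0] then f
  else
    let l1 := f.length
    let l2 := g.length
    let f' := if l1 < l2 then List.replicate (l2 - l1) 0 ++ f else f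
    let g' := if l2 < l1 then List.replicate (l1 - l2) 0 ++ g else g
    normPoly ((List.range (max l1 l2)).map (fun i => PySem.Int.mod (f'.getD i 0 - g'.getD i 0) p))

-- resultado[i+j] += f[i]*g[j]
def addAt (l : List Int) (i : Nat) (v : Int) : List Int := l.set i (l.getD i 0 + v)

def multPoli (f g : List Int) (p : Int) : List Int :=
  let l1 := f.length
  let l2 := g.length
  if f = [0] ∨ g = [0] then [0]
  else if f = [1] then g
  else if g = [1] then f
  else
    let res := (List.range l1).foldl
      (fun acc i => (List.range l2).foldl
        (fun acc2 j => addAt acc2 (i + j) (f.getD i 0 * g.getD j 0)) acc)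
      (List.replicate (l1 + l2 - 1) 0)
    normPoly (res.map (fun x => PySem.Int.mod x p))

-- the while loop of div_poli; fuel f.length + 1 is enough on every input Pre_ admits
-- (each iteration strictly shortens r there).  Where Python raises (lead_g == 0 or a
-- non-invertible leading coefficient) the port returns junk; Pre_ excludes those inputs.
def aLoop (g : List Int) (p : Int) : Nat → List Int → List Int → List Int × List Int
  | 0, q, r => (q, r)
  | fuel + 1, q, r =>
    if r ≠ [0] ∧ g.length ≤ r.length then
      if g.headD 0 = 0 then (q, r)
      else
        let coef := PySem.Int.mod (r.headD 0 * pyInvMod (g.headD 0) p) p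
        let t := normPoly (coef :: List.replicate (r.length - g.length) 0)
        let q' := sumaPoli q t p
        let aux := multPoli t g p
        let r' := restaPoli r aux p
        aLoop g p fuel q' r'
    else (q, r)

def div_poli (f : List Int) (g : List Int) (p_n : Int) : List Int × List Int :=
  if g = [0] then ([0], [0])  -- Python raises ValueError here (outside Pre_)
  else aLoop g p_n (f.length + 1) [0] f

-- ===== PORT B =====
-- `for j in range(1, m): tail[j-1] = (tail[j-1] - c*g[j]) % p_n`
def bSub (t gt : List Int) (c p : Int) : List Int :=
  match t, gt with
  | t, [] => t
  | [], _ :: _ => []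
  | x :: t, y :: gt => PySem.Int.mod (x - c * y) p :: bSub t gt c p

-- `while len(r) >= m: ...` of B; structural fuel recursion (fuel = len(r) is always
-- enough: each iteration shortens r by exactly one).
def bLoopF (g : List Int) (p inv : Int) : Nat → List Int → List Int × List Int
  | 0, r => ([], r)
  | _ + 1, [] => ([], [])
  | fuel + 1, h :: t =>
    if t.length + 1 < g.length then ([], h :: t)
    else
      let c := PySem.Int.mod (h * inv) p
      let tail := if c = 0 then t else bSub t g.tail c p
      let res := bLoopF g p inv fuel tail
      (c :: res.1, res.2)

def bLoop (g : List Int) (p inv : Int) (r : List Int) : List Int × List Int :=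
  bLoopF g p inv r.length r

def div_poli_alt (f : List Int) (g : List Int) (p_n : Int) : List Int × List Int :=
  if g = [0] then ([0], [0])  -- Python raises ValueError here (outside Pre_)
  else if f.length < g.length then ([0], f)
  else
    let inv := pyInvMod (g.headD 0) p_n
    let res := bLoop g p_n inv (f.map (fun c => PySem.Int.mod c p_n))
    (res.1, normPoly res.2)

-- ===== PRECONDITION & SPEC =====
-- Pre_ excludes the inputs where A raises (g = [] with f ≠ [0], g = [0], a leading divisor
-- coefficient not invertible mod p_n, |p_n| < 2) and where A loops forever (f ≠ [0] whose
-- leading coefficient is divisible by p_n); the only excluded inputs on which A RETURNS are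
-- the degenerate dividends f = [0] against an empty or non-invertible single-term divisor,
-- where A accidentally skips its own inverse computation and B's pow raises.
def Pre_div_poli (f : List Int) (g : List Int) (p_n : Int) : Prop :=
  g ≠ [] ∧ g ≠ [0] ∧
    (f.length < g.length ∨
      (2 ≤ p_n.natAbs ∧ Int.gcd (g.headD 0) p_n = 1 ∧
        (f = [0] ∨ PySem.Int.mod (f.headD 0) p_n ≠ 0)))
instance (f : List Int) (g : List Int) (p_n : Int) : Decidable (Pre_div_poli f g p_n) := by
  unfold Pre_div_poli; infer_instance

def pvWitness_div_poli : List Int × List Int × Int := ([1, 2, 3, 4], [1, 2], 5)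

def Spec_div_poli (f : List Int) (g : List Int) (p_n : Int) (out : List Int × List Int) : Prop := out = div_poli_alt f g p_n
instance (f : List Int) (g : List Int) (p_n : Int) (out : List Int × List Int) : Decidable (Spec_div_poli f g p_n out) := by unfold Spec_div_poli; infer_instance

-- ===== CLAIM (what is proved, stated in full; the proofs are below) =====
def Claim_equal_div_poli : Prop := ∀ (f : List Int) (g : List Int) (p_n : Int), Dom_div_poli f g p_n → Pre_div_poli f g p_n → Spec_div_poli f g p_n (div_poli f g p_n)

-- ===== LEMMAS AND PROOFS =====

theorem bSub_length (t gt : List Int) (c p : Int) : (bSub t gt c p).length = t.length := by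
  induction t generalizing gt with
  | nil => cases gt <;> simp [bSub]
  | cons x t ih => cases gt <;> simp [bSub, ih]


-- ---------- arithmetic toolkit: Python-mod congruences (any sign of p) ----------

theorem pv_dvd_mod_sub (a p : Int) : p ∣ (PySem.Int.mod a p - a) :=
  ⟨-(PySem.Int.floordiv a p), by
    have h := PySem.Int.floordiv_mul_add_mod a p; linarith⟩

theorem pv_mod_congr {p : Int} (hp : p ≠ 0) {a b : Int} (h : p ∣ (a - b)) :
    PySem.Int.mod a p = PySem.Int.mod b p := by
  have hd : p ∣ (PySem.Int.mod a p - PySem.Int.mod b p) := by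
    have h1 := pv_dvd_mod_sub a p
    have h2 := pv_dvd_mod_sub b p
    have : PySem.Int.mod a p - PySem.Int.mod b p
        = (PySem.Int.mod a p - a) - (PySem.Int.mod b p - b) + (a - b) := by ring
    rw [this]; exact dvd_add (dvd_sub h1 h2) h
  have hz : PySem.Int.mod a p - PySem.Int.mod b p = 0 := by
    apply Int.eq_zero_of_dvd_of_natAbs_lt_natAbs hd
    rcases lt_or_gt_of_ne hp with hneg | hpos
    · have b1 := PySem.Int.mod_neg_bounds a hneg
      have b2 := PySem.Int.mod_neg_bounds b hneg
      omega
    · have b1 := PySem.Int.mod_nonneg a hpos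
      have b2 := PySem.Int.mod_lt a hpos
      have b3 := PySem.Int.mod_nonneg b hpos
      have b4 := PySem.Int.mod_lt b hpos
      omega
  omega

theorem pv_mod_idem {p : Int} (hp : p ≠ 0) (a : Int) :
    PySem.Int.mod (PySem.Int.mod a p) p = PySem.Int.mod a p :=
  pv_mod_congr hp (pv_dvd_mod_sub a p)

theorem pv_mod_zero (p : Int) : PySem.Int.mod 0 p = 0 :=
  (PySem.Int.mod_eq_zero_iff_dvd 0 p).mpr (dvd_zero p)

-- all entries are Python-mod-p reduced
def isRed (p : Int) (l : List Int) : Prop := ∀ x ∈ l, PySem.Int.mod x p = x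

theorem red_map {p : Int} (hp : p ≠ 0) (l : List Int) :
    isRed p (l.map (fun x => PySem.Int.mod x p)) := by
  intro x hx
  obtain ⟨y, _, rfl⟩ := List.mem_map.mp hx
  exact pv_mod_idem hp y

theorem red_map_id {p : Int} {l : List Int} (h : isRed p l) :
    l.map (fun x => PySem.Int.mod x p) = l := by
  rw [List.map_congr_left h, List.map_id']

-- ---------- normPoly / stripZ ----------

theorem np_nil : normPoly [] = [0] := rfl

theorem np_cons_ne {x : Int} (h : x ≠ 0) (t : List Int) : normPoly (x :: t) = x :: t := by
  simp [normPoly, stripZ, h]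

theorem np_cons_zero (t : List Int) : normPoly ((0 : Int) :: t) = normPoly t := by
  simp [normPoly, stripZ]

theorem stripZ_length_le (l : List Int) : (stripZ l).length ≤ l.length := by
  induction l with
  | nil => simp [stripZ]
  | cons x t ih => by_cases h : x = 0 <;> simp [stripZ, h] <;> omega

theorem np_length_le {l : List Int} (h : l ≠ []) : (normPoly l).length ≤ l.length := by
  unfold normPoly
  by_cases hs : stripZ l = [] <;> simp only [hs, if_pos, reduceIte]
  · cases l with
    | nil => exact absurd rfl h
    | cons x t => simp
  · exact stripZ_length_le l

-- ---------- the range/getD comprehension is a zipWith ----------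

theorem range_map_zip (φ : Int → Int → Int) :
    ∀ (F G : List Int), F.length = G.length →
      (List.range F.length).map (fun i => φ (F.getD i 0) (G.getD i 0)) = List.zipWith φ F G := by
  intro F
  induction F with
  | nil => intro G h; simp
  | cons a F ih =>
    intro G h
    cases G with
    | nil => simp at h
    | cons b G =>
      simp only [List.length_cons, List.range_succ_eq_map, List.map_cons, List.map_map]
      simp only [List.getD_cons_zero, List.zipWith_cons_cons]
      congr 1
      have := ih G (by simpa using h)
      simpa using this

-- ---------- zipWith against zeros ----------

theorem zip_sub_zeros (p : Int) :
    ∀ (t : List Int) (k : Nat), t.length = k →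
      List.zipWith (fun a b => PySem.Int.mod (a - b) p) t (List.replicate k 0)
        = t.map (fun x => PySem.Int.mod x p) := by
  intro t
  induction t with
  | nil => intro k h; simp
  | cons x t ih =>
    intro k h
    cases k with
    | zero => simp at h
    | succ k => simp [List.replicate_succ, ih k (by simpa using h)]

theorem zip_add_zeros_right {p : Int} :
    ∀ (t : List Int) (k : Nat), t.length = k → isRed p t →
      List.zipWith (fun a b => PySem.Int.mod (a + b) p) t (List.replicate k 0) = t := by
  intro t
  induction t with
  | nil => intro k h _; simp
  | cons x t ih =>
    intro k h hred
    cases k with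
    | zero => simp at h
    | succ k =>
      have hx : PySem.Int.mod x p = x := hred x (by simp)
      simp [List.replicate_succ, ih k (by simpa using h) (fun y hy => hred y (by simp [hy])), hx]

theorem zip_add_zeros_left {p : Int} :
    ∀ (l : List Int) (k : Nat), l.length = k → isRed p l →
      List.zipWith (fun a b => PySem.Int.mod (a + b) p) (List.replicate k 0) l = l := by
  intro l
  induction l with
  | nil => intro k h _; simp
  | cons x l ih =>
    intro k h hred
    cases k with
    | zero => simp at h
    | succ k =>
      have hx : PySem.Int.mod x p = x := hred x (by simp)
      simp [List.replicate_succ, ih k (by simpa using h) (fun y hy => hred y (by simp [hy])), hx]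

-- ---------- bSub ----------

theorem bSub_red {p : Int} (hp : p ≠ 0) (c : Int) :
    ∀ (t gt : List Int), isRed p t → isRed p (bSub t gt c p) := by
  intro t
  induction t with
  | nil => intro gt h; cases gt <;> simpa [bSub] using h
  | cons x t ih =>
    intro gt h
    cases gt with
    | nil => simpa [bSub] using h
    | cons y gt =>
      intro z hz
      simp only [bSub, List.mem_cons] at hz
      rcases hz with rfl | hz
      · exact pv_mod_idem hp _
      · exact ih gt (fun w hw => h w (by simp [hw])) z hz

theorem bSub_spec {p c : Int} (hp : p ≠ 0) :
    ∀ (gt t : List Int) (k : Nat), t.length = gt.length + k →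
      List.zipWith (fun a b => PySem.Int.mod (a - b) p) t
          ((gt.map fun y => PySem.Int.mod (c * y) p) ++ List.replicate k 0)
        = bSub (t.map fun x => PySem.Int.mod x p) gt c p := by
  intro gt
  induction gt with
  | nil =>
    intro t k h
    simp only [List.map_nil, List.nil_append]
    rw [zip_sub_zeros p t k (by simpa using h)]
    cases t <;> simp [bSub]
  | cons y gt ih =>
    intro t k h
    cases t with
    | nil => simp at h; omega
    | cons x t =>
      simp only [List.map_cons, List.cons_append, List.zipWith_cons_cons, bSub]
      refine List.cons_eq_cons.mpr ⟨?_, ?_⟩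
      · exact pv_mod_congr hp (by
          have h1 := pv_dvd_mod_sub (c * y) p
          have h2 := pv_dvd_mod_sub x p
          have heq : x - PySem.Int.mod (c * y) p - (PySem.Int.mod x p - c * y)
              = -(PySem.Int.mod x p - x) - (PySem.Int.mod (c * y) p - c * y) := by ring
          rw [heq]
          exact dvd_sub (dvd_neg.mpr h2) h1)
      · exact ih t k (by simp at h; omega)

theorem bSub_spec_raw {p : Int} (hp : p ≠ 0) :
    ∀ (gt t : List Int), t.length = gt.length →
      List.zipWith (fun a b => PySem.Int.mod (a - b) p) t gt
        = bSub (t.map fun x => PySem.Int.mod x p) gt 1 p := by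
  intro gt
  induction gt with
  | nil => intro t h; cases t <;> simp_all [bSub]
  | cons y gt ih =>
    intro t h
    cases t with
    | nil => simp at h
    | cons x t =>
      simp only [List.map_cons, List.zipWith_cons_cons, bSub, one_mul]
      refine List.cons_eq_cons.mpr ⟨?_, ?_⟩
      · exact pv_mod_congr hp (by
          have h1 := pv_dvd_mod_sub x p
          have heq : x - y - (PySem.Int.mod x p - y) = -(PySem.Int.mod x p - x) := by ring
          rw [heq]; exact dvd_neg.mpr h1)
      · exact ih t (by simpa using h)


-- ---------- multPoli on a monomial c·x^k ----------

theorem addAt_zero (l : List Int) (i : Nat) : addAt l i 0 = l := by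
  unfold addAt
  by_cases h : i < l.length
  · rw [List.getD_eq_getElem l 0 h, add_zero, List.set_getElem_self h]
  · rw [List.set_eq_of_length_le (by omega)]

theorem getD_replicate_zero (k i : Nat) : (List.replicate k (0:Int)).getD i 0 = 0 := by
  by_cases h : i < k
  · exact List.getD_replicate 0 h
  · exact List.getD_eq_default _ _ (by simpa using h)

theorem conv_inner (g : List Int) (c : Int) (k : Nat) :
    ∀ j, j ≤ g.length →
      (List.range j).foldl (fun acc jj => addAt acc jj (c * g.getD jj 0))
          (List.replicate (g.length + k) 0)
        = (g.take j).map (fun y => c * y) ++ List.replicate (g.length + k - j) 0 := by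
  intro j
  induction j with
  | zero => intro _; simp
  | succ j ih =>
    intro hj
    rw [List.range_succ, List.foldl_append, ih (by omega)]
    simp only [List.foldl_cons, List.foldl_nil]
    have hlenA : ((g.take j).map (fun y => c * y)).length = j := by
      simp [List.length_take]; omega
    have hrep : g.length + k - j = (g.length + k - (j+1)) + 1 := by omega
    unfold addAt
    rw [List.getD_append_right _ _ _ _ (by omega), hlenA, Nat.sub_self,
      getD_replicate_zero, List.set_append]
    rw [if_neg (by omega), hlenA, Nat.sub_self, hrep, List.replicate_succ, List.set_cons_zero]
    have hjlt : j < g.length := by omega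
    rw [List.take_succ_eq_append_getElem hjlt, List.map_append,
      List.getD_eq_getElem g 0 hjlt]
    simp

theorem mult_cs {p c : Int} {g : List Int} (k : Nat) (hc : c ≠ 0)
    (hcred : PySem.Int.mod c p = c) (hgne : g ≠ []) (hgnz : g ≠ [0]) :
    multPoli (c :: List.replicate k 0) g p
      = if c = 1 ∧ k = 0 then g
        else normPoly ((g.map fun y => PySem.Int.mod (c * y) p) ++ List.replicate k 0) := by
  have hm1 : 1 ≤ g.length := by cases g with
    | nil => exact absurd rfl hgne
    | cons a t => simp
  unfold multPoli
  rw [if_neg (by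
    rintro (h | h)
    · rcases k with _ | k <;> simp_all
    · exact hgnz h)]
  by_cases h1 : c = 1 ∧ k = 0
  · obtain ⟨rfl, rfl⟩ := h1; simp
  · rw [if_neg h1]
    have hne1 : ¬ (c :: List.replicate k 0 = [1]) := by
      rcases k with _ | k <;> simp_all
    rw [if_neg hne1]
    by_cases hg1 : g = [1]
    · subst hg1
      simp only [if_pos rfl]
      simp [np_cons_ne hc, mul_one, hcred]
    · rw [if_neg hg1]
      have hlen : (c :: List.replicate k 0).length + g.length - 1 = g.length + k := by
        simp; omega
      rw [hlen]
      have houter :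
          (List.range (c :: List.replicate k 0).length).foldl
            (fun acc i => (List.range g.length).foldl
              (fun acc2 j => addAt acc2 (i + j)
                ((c :: List.replicate k 0).getD i 0 * g.getD j 0)) acc)
            (List.replicate (g.length + k) 0)
          = (g.map fun y => c * y) ++ List.replicate k 0 := by
        simp only [List.length_cons, List.length_replicate]
        rw [List.range_succ_eq_map, List.foldl_cons, List.foldl_map]
        have hfirst :
            (List.range g.length).foldl
              (fun acc2 j => addAt acc2 (0 + j)
                ((c :: List.replicate k 0).getD 0 0 * g.getD j 0))
              (List.replicate (g.length + k) 0)
            = (g.map fun y => c * y) ++ List.replicate k 0 := by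
          have := conv_inner g c k g.length (le_refl _)
          simpa using this
        rw [hfirst]
        refine List.foldl_fixed' (fun i => ?_) _
        have hz : (c :: List.replicate k 0).getD (i + 1) 0 = 0 := by
          simp [getD_replicate_zero]
        rw [hz]
        refine List.foldl_fixed' (fun j => ?_) _
        simp [addAt_zero]
      simp only [houter, List.map_append, List.map_map, List.map_replicate,
        pv_mod_zero, Function.comp_def]

-- ---------- addQ: what A's quotient accumulation computes ----------

-- pointwise mod-p addition of l into the low-order end of q (for l shorter than q)
def addQ (p : Int) (q l : List Int) : List Int :=
  q.take (q.length - l.length)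
    ++ List.zipWith (fun a b => PySem.Int.mod (a + b) p) (q.drop (q.length - l.length)) l

theorem addQ_nil (p : Int) (q : List Int) : addQ p q [] = q := by
  simp [addQ]

theorem addQ_length {p : Int} {q l : List Int} (h : l.length ≤ q.length) :
    (addQ p q l).length = q.length := by
  simp [addQ, List.length_take, List.length_zipWith]; omega

theorem mem_zip_add_red {p : Int} (hp : p ≠ 0) :
    ∀ (u v : List Int) (x : Int),
      x ∈ List.zipWith (fun a b => PySem.Int.mod (a + b) p) u v → PySem.Int.mod x p = x := by
  intro u
  induction u with
  | nil => intro v x hx; simp at hx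
  | cons a u ih =>
    intro v x hx
    cases v with
    | nil => simp at hx
    | cons b v =>
      rcases List.mem_cons.mp hx with rfl | hx
      · exact pv_mod_idem hp _
      · exact ih v x hx

theorem addQ_red {p : Int} (hp : p ≠ 0) {q : List Int} (hq : isRed p q) (l : List Int) :
    isRed p (addQ p q l) := by
  intro x hx
  rcases List.mem_append.mp hx with hx | hx
  · exact hq x (List.mem_of_mem_take hx)
  · exact mem_zip_add_red hp _ _ x hx

theorem take_drop_cons {q : List Int} {d : Nat} (h : d < q.length) :
    q.drop d = q[d] :: q.drop (d + 1) :=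
  List.drop_eq_getElem_cons h

theorem addQ_head {p : Int} {q l : List Int} (h : l.length < q.length) :
    addQ p q l = q.headD 0 :: ((q.take (q.length - l.length)).tail
      ++ List.zipWith (fun a b => PySem.Int.mod (a + b) p) (q.drop (q.length - l.length)) l) := by
  cases q with
  | nil => simp at h
  | cons q0 qt =>
    unfold addQ
    have hd : (q0 :: qt).length - l.length = ((q0 :: qt).length - l.length - 1) + 1 := by
      simp at h ⊢; omega
    rw [hd, List.take_succ_cons]
    simp

theorem addQ_zero_cons {p : Int} {q l : List Int} (hq : isRed p q)
    (h : l.length + 1 ≤ q.length) :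
    addQ p q ((0 : Int) :: l) = addQ p q l := by
  unfold addQ
  have hd : q.length - (((0:Int) :: l).length) < q.length := by simp; omega
  have hd' : q.length - l.length = (q.length - ((0:Int) :: l).length) + 1 := by simp; omega
  rw [take_drop_cons hd, List.zipWith_cons_cons]
  have hred : PySem.Int.mod (q[q.length - ((0:Int)::l).length] + 0) p
      = q[q.length - ((0:Int)::l).length] := by
    rw [add_zero]; exact hq _ (List.getElem_mem _)
  rw [hred, hd']
  have h2 : q.length - (l.length + 1) < q.length := by omega
  simp only [List.length_cons]
  rw [List.take_succ_eq_append_getElem h2]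
  simp only [List.append_assoc, List.singleton_append]

theorem addQ_step {p c : Int} {q l : List Int} {k : Nat} (hq : isRed p q)
    (hl : l.length = k) (hk : k + 2 ≤ q.length) :
    addQ p (addQ p q (c :: List.replicate k 0)) l = addQ p q (c :: l) := by
  have hd : q.length - (c :: List.replicate k 0).length = q.length - (k + 1) := by simp
  set d := q.length - (k + 1) with hdef
  have hdlt : d < q.length := by omega
  have hdrop : q.drop d = q[d] :: q.drop (d + 1) := take_drop_cons hdlt
  have hlen_drop : (q.drop (d + 1)).length = k := by simp [List.length_drop]; omega
  have hred_drop : isRed p (q.drop (d + 1)) := fun x hx => hq x (List.mem_of_mem_drop hx)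
  have hA : addQ p q (c :: List.replicate k 0)
      = q.take d ++ PySem.Int.mod (q[d] + c) p :: q.drop (d + 1) := by
    unfold addQ
    rw [hd, hdrop, List.zipWith_cons_cons,
      zip_add_zeros_right (q.drop (d+1)) k hlen_drop hred_drop]
  rw [hA]
  have hlenA : (q.take d ++ PySem.Int.mod (q[d] + c) p :: q.drop (d + 1)).length = q.length := by
    simp [List.length_take]; omega
  have hlentake : (q.take d).length = d := by simp [List.length_take]; omega
  unfold addQ
  rw [hlenA, hl]
  have hq_minus : q.length - k = d + 1 := by omega
  rw [hq_minus]
  have htake : (q.take d ++ PySem.Int.mod (q[d] + c) p :: q.drop (d + 1)).take (d + 1)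
      = q.take d ++ [PySem.Int.mod (q[d] + c) p] := by
    rw [List.take_append, List.take_of_length_le (by omega), hlentake]
    simp
  have hdrop2 : (q.take d ++ PySem.Int.mod (q[d] + c) p :: q.drop (d + 1)).drop (d + 1)
      = q.drop (d + 1) := by
    rw [List.drop_append, List.drop_of_length_le (by omega), hlentake]
    simp
  rw [htake, hdrop2]
  have hright : q.length - (c :: l).length = d := by simp; omega
  rw [hright, hdrop, List.zipWith_cons_cons]
  simp [List.append_assoc]

theorem addQ_final {p c : Int} {l : List Int} {k : Nat} (hl : l.length = k)
    (hred : isRed p l) :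
    addQ p (c :: List.replicate k 0) l = c :: l := by
  unfold addQ
  have h1 : (c :: List.replicate k 0).length - l.length = 1 := by simp [hl]
  rw [h1]
  simp only [List.take_succ_cons, List.take_zero, List.drop_succ_cons, List.drop_zero]
  rw [← hl, zip_add_zeros_left l l.length rfl hred]
  simp

-- ---------- sumaPoli / restaPoli on the shapes A's loop produces ----------

theorem suma_eq_addQ {p : Int} {q l : List Int} (hp : p ≠ 0)
    (hq0 : q.headD 0 ≠ 0) (hqne : q ≠ []) (hred : isRed p q)
    (hlen : l.length < q.length) (hl0 : l ≠ [0]) :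
    sumaPoli q l p = addQ p q l := by
  have hqz : q ≠ [0] := by
    intro h; rw [h] at hq0; simp at hq0
  unfold sumaPoli
  rw [if_neg hqz, if_neg hl0]
  simp only []
  have hnlt : ¬ (q.length < l.length) := by omega
  rw [if_neg hnlt, if_pos hlen]
  set d := q.length - l.length with hdef
  have hmax : max q.length l.length = q.length := by omega
  have hlenpad : (List.replicate d (0:Int) ++ l).length = q.length := by
    simp; omega
  rw [hmax]
  have hzip := range_map_zip (fun a b => PySem.Int.mod (a + b) p) q
    (List.replicate d 0 ++ l) (by omega)
  rw [hzip]
  have hsplit : q = q.take d ++ q.drop d := (List.take_append_drop d q).symm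
  have htlen : (q.take d).length = d := by simp [List.length_take]; omega
  conv_lhs => rw [hsplit]
  rw [List.zipWith_append (by simp [htlen])]
  rw [zip_add_zeros_right (q.take d) d htlen
    (fun x hx => hred x (List.mem_of_mem_take hx))]
  have hd1 : 1 ≤ d := by omega
  have : q.take d = q.headD 0 :: (q.take d).tail := by
    cases q with
    | nil => exact absurd rfl hqne
    | cons q0 qt =>
      have : d = (d - 1) + 1 := by omega
      rw [this, List.take_succ_cons]
      simp
  rw [this, List.cons_append, np_cons_ne hq0, ← List.cons_append, ← this]
  unfold addQ
  rw [← hdef]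

theorem resta_step {p c : Int} {g rf : List Int} {k : Nat}
    (hp : p ≠ 0) (hgne : g ≠ []) (hgnz : g ≠ [0])
    (hlen : rf.length = g.length + k)
    (hc : c ≠ 0) (hcred : PySem.Int.mod c p = c)
    (hcg : p ∣ (c * g.headD 0 - rf.headD 0))
    (hcg0 : PySem.Int.mod (c * g.headD 0) p ≠ 0) :
    restaPoli rf (multPoli (c :: List.replicate k 0) g p) p
      = normPoly (bSub (rf.tail.map (fun x => PySem.Int.mod x p)) g.tail c p) := by
  obtain ⟨g0, gt, rfl⟩ : ∃ g0 gt, g = g0 :: gt := by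
    cases g with
    | nil => exact absurd rfl hgne
    | cons a t => exact ⟨a, t, rfl⟩
  obtain ⟨rh, rt, rfl⟩ : ∃ rh rt, rf = rh :: rt := by
    cases rf with
    | nil => exact ((by simp at hlen; omega) : False).elim
    | cons a t => exact ⟨a, t, rfl⟩
  simp only [List.headD_cons] at hcg hcg0
  rw [mult_cs k hc hcred hgne hgnz]
  by_cases h1 : c = 1 ∧ k = 0
  · obtain ⟨rfl, rfl⟩ := h1
    rw [if_pos ⟨rfl, rfl⟩]
    have hk0 : (rh :: rt).length = (g0 :: gt).length := by simpa using hlen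
    unfold restaPoli
    rw [if_neg hgnz]
    simp only []
    have hnlt1 : ¬ ((rh :: rt).length < (g0 :: gt).length) := by omega
    have hnlt2 : ¬ ((g0 :: gt).length < (rh :: rt).length) := by omega
    rw [if_neg hnlt1, if_neg hnlt2]
    have hmax : max (rh :: rt).length (g0 :: gt).length = (rh :: rt).length := by omega
    rw [hmax, range_map_zip (fun a b => PySem.Int.mod (a - b) p) _ _ hk0]
    rw [List.zipWith_cons_cons]
    have hhead : PySem.Int.mod (rh - g0) p = 0 := by
      have : PySem.Int.mod (rh - g0) p = PySem.Int.mod 0 p := by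
        apply pv_mod_congr hp
        simpa using (dvd_neg.mpr hcg)
      rw [this, pv_mod_zero]
    rw [hhead, np_cons_zero]
    congr 1
    have := bSub_spec_raw hp gt rt (by simp at hlen; omega)
    simpa using this
  · rw [if_neg h1]
    have haux : normPoly (((g0 :: gt).map fun y => PySem.Int.mod (c * y) p)
          ++ List.replicate k 0)
        = PySem.Int.mod (c * g0) p
            :: ((gt.map fun y => PySem.Int.mod (c * y) p) ++ List.replicate k 0) := by
      rw [List.map_cons, List.cons_append, np_cons_ne hcg0]
    rw [haux]
    set aux := PySem.Int.mod (c * g0) p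
        :: ((gt.map fun y => PySem.Int.mod (c * y) p) ++ List.replicate k 0) with hauxdef
    have hauxlen : aux.length = (rh :: rt).length := by
      have h' : rt.length + 1 = gt.length + 1 + k := by simpa using hlen
      simp [hauxdef]; omega
    have hauxnz : aux ≠ [0] := by
      intro h
      rw [hauxdef] at h
      exact hcg0 (by simpa using (List.cons_eq_cons.mp h).1)
    unfold restaPoli
    rw [if_neg hauxnz]
    simp only []
    have hnlt1 : ¬ ((rh :: rt).length < aux.length) := by omega
    have hnlt2 : ¬ (aux.length < (rh :: rt).length) := by omega
    rw [if_neg hnlt1, if_neg hnlt2]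
    have hmax : max (rh :: rt).length aux.length = (rh :: rt).length := by omega
    rw [hmax, range_map_zip (fun a b => PySem.Int.mod (a - b) p) _ _ hauxlen.symm]
    rw [hauxdef, List.zipWith_cons_cons]
    have hhead : PySem.Int.mod (rh - PySem.Int.mod (c * g0) p) p = 0 := by
      have step1 : PySem.Int.mod (rh - PySem.Int.mod (c * g0) p) p
          = PySem.Int.mod (rh - c * g0) p := by
        apply pv_mod_congr hp
        have h1 := pv_dvd_mod_sub (c * g0) p
        have heq : rh - PySem.Int.mod (c * g0) p - (rh - c * g0)
            = -(PySem.Int.mod (c * g0) p - c * g0) := by ring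
        rw [heq]; exact dvd_neg.mpr h1
      have step2 : PySem.Int.mod (rh - c * g0) p = PySem.Int.mod 0 p := by
        apply pv_mod_congr hp
        simpa using (dvd_neg.mpr hcg)
      rw [step1, step2, pv_mod_zero]
    rw [hhead, np_cons_zero]
    congr 1
    exact bSub_spec hp gt rt k (by simp at hlen; omega)

-- ---------- bLoopF bookkeeping ----------

theorem bq_length {g : List Int} (hg : 1 ≤ g.length) (p inv : Int) :
    ∀ (fb : Nat) (rb : List Int), rb.length ≤ fb →
      (bLoopF g p inv fb rb).1.length = rb.length + 1 - g.length := by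
  intro fb
  induction fb with
  | zero =>
    intro rb h
    have : rb = [] := List.eq_nil_of_length_eq_zero (by omega)
    subst this
    simp [bLoopF]; omega
  | succ fb ih =>
    intro rb h
    cases rb with
    | nil => simp [bLoopF]; omega
    | cons hd t =>
      by_cases hlt : t.length + 1 < g.length
      · simp only [bLoopF, if_pos hlt]; simp; omega
      · simp only [bLoopF, if_neg hlt, List.length_cons]
        by_cases hc : PySem.Int.mod (hd * inv) p = 0
        · rw [if_pos hc]
          have := ih t (by simp at h; omega)
          simp [this]; omega
        · rw [if_neg hc]
          have hbl : (bSub t g.tail (PySem.Int.mod (hd * inv) p) p).length = t.length :=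
            bSub_length _ _ _ _
          have := ih (bSub t g.tail (PySem.Int.mod (hd * inv) p) p)
            (by rw [hbl]; simp at h; omega)
          simp [this, hbl]; omega

theorem bq_red {p : Int} (hp : p ≠ 0) (g : List Int) (inv : Int) :
    ∀ (fb : Nat) (rb : List Int), isRed p (bLoopF g p inv fb rb).1 := by
  intro fb
  induction fb with
  | zero => intro rb x hx; simp [bLoopF] at hx
  | succ fb ih =>
    intro rb
    cases rb with
    | nil => intro x hx; simp [bLoopF] at hx
    | cons hd t =>
      by_cases hlt : t.length + 1 < g.length
      · intro x hx; simp [bLoopF, hlt] at hx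
      · intro x hx
        simp only [bLoopF, if_neg hlt] at hx
        rcases List.mem_cons.mp hx with rfl | hx
        · exact pv_mod_idem hp _
        · exact ih _ x hx

-- ---------- the main loop correspondence ----------

theorem loop_eq (g : List Int) (p inv : Int)
    (hp2 : 2 ≤ p.natAbs) (hgne : g ≠ []) (hgnz : g ≠ [0])
    (hinveq : inv = pyInvMod (g.headD 0) p)
    (hinv : p ∣ (g.headD 0 * inv - 1)) :
    ∀ (n : Nat) (rb q : List Int) (fuel fb : Nat),
      rb.length = n → n ≤ fb → isRed p rb → n + 1 ≤ fuel →
      q ≠ [] → q.headD 0 ≠ 0 → isRed p q → n + 2 ≤ q.length + g.length →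
      aLoop g p fuel q (normPoly rb)
        = (addQ p q (bLoopF g p inv fb rb).1,
           normPoly (bLoopF g p inv fb rb).2) := by
  have hp : p ≠ 0 := by intro h; rw [h] at hp2; simp at hp2
  have hg0 : g.headD 0 ≠ 0 := by
    intro h
    rw [h] at hinv
    have h1 : p ∣ (1 : Int) := by simpa using (dvd_neg.mpr hinv)
    have h2 : p.natAbs ∣ (1 : Int).natAbs := Int.natAbs_dvd_natAbs.mpr h1
    simp at h2; omega
  have hm1 : 1 ≤ g.length := by
    cases g with
    | nil => exact absurd rfl hgne
    | cons a t => simp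
  have hkill : ∀ x : Int, p ∣ x * inv → p ∣ x := by
    intro x hx
    have h1 : p ∣ x * inv * g.headD 0 := hx.mul_right _
    have h2 : p ∣ x * (g.headD 0 * inv - 1) := hinv.mul_left x
    have heq : x = x * inv * g.headD 0 - x * (g.headD 0 * inv - 1) := by ring
    rw [heq]; exact dvd_sub h1 h2
  intro n
  induction n using Nat.strong_induction_on with
  | _ n ih =>
    intro rb q fuel fb hlen hfb hred hfuel hqne hq0 hqred hqlen
    obtain ⟨fuel', rfl⟩ : ∃ fl, fuel = fl + 1 := ⟨fuel - 1, by omega⟩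
    cases rb with
    | nil =>
      have hB : bLoopF g p inv fb [] = ([], []) := by cases fb <;> rfl
      rw [hB, np_nil]
      simp [aLoop, addQ_nil, np_nil]
    | cons h t =>
      have hn : n = t.length + 1 := by simpa using hlen.symm
      obtain ⟨fb', rfl⟩ : ∃ x, fb = x + 1 := ⟨fb - 1, by omega⟩
      by_cases hnm : t.length + 1 < g.length
      · -- r too short: both sides stop
        have hB : bLoopF g p inv (fb' + 1) (h :: t) = ([], h :: t) := by
          simp [bLoopF, hnm]
        rw [hB, addQ_nil]
        have hcond : ¬ (normPoly (h :: t) ≠ [0] ∧ g.length ≤ (normPoly (h :: t)).length) := by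
          rintro ⟨-, hlen2⟩
          have hle := np_length_le (l := h :: t) (by simp)
          simp at hle
          omega
        simp [aLoop, hcond]
      · by_cases hh : h = 0
        · -- B pads the quotient with 0; A's normPoly drops the same leading zero
          subst hh
          have hc0 : PySem.Int.mod (0 * inv) p = 0 := by rw [zero_mul, pv_mod_zero]
          have hB : bLoopF g p inv (fb' + 1) ((0 : Int) :: t)
              = (0 :: (bLoopF g p inv fb' t).1, (bLoopF g p inv fb' t).2) := by
            simp [bLoopF, hnm, hc0, pv_mod_zero]
          rw [hB, np_cons_zero]
          have hbql : (bLoopF g p inv fb' t).1.length = t.length + 1 - g.length :=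
            bq_length hm1 p inv fb' t (by omega)
          rw [ih t.length (by omega) t q (fuel' + 1) fb' rfl (by omega)
            (fun x hx => hred x (by simp [hx])) (by omega) hqne hq0 hqred (by omega)]
          rw [addQ_zero_cons hqred (by omega)]
        · -- the real division step
          have hhred : PySem.Int.mod h p = h := hred h (by simp)
          have hpdvd_h : ¬ p ∣ h := by
            intro hd
            have := (PySem.Int.mod_eq_zero_iff_dvd h p).mpr hd
            rw [hhred] at this
            exact hh this
          have hc : PySem.Int.mod (h * inv) p ≠ 0 := by
            intro h0
            exact hpdvd_h (hkill h ((PySem.Int.mod_eq_zero_iff_dvd _ p).mp h0))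
          set c := PySem.Int.mod (h * inv) p with hcdef
          have hcred : PySem.Int.mod c p = c := pv_mod_idem hp _
          have hcg : p ∣ (c * g.headD 0 - h) := by
            have h1 : p ∣ (c - h * inv) := by
              rw [hcdef]; exact pv_dvd_mod_sub (h * inv) p
            have h2 : p ∣ h * (g.headD 0 * inv - 1) := hinv.mul_left h
            have heq : c * g.headD 0 - h
                = (c - h * inv) * g.headD 0 + h * (g.headD 0 * inv - 1) := by ring
            rw [heq]; exact dvd_add (h1.mul_right _) h2
          have hcg0 : PySem.Int.mod (c * g.headD 0) p ≠ 0 := by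
            intro h0
            have hd := (PySem.Int.mod_eq_zero_iff_dvd _ p).mp h0
            have h1 : p ∣ c * (g.headD 0 * inv) := by
              have := hd.mul_right inv; rwa [mul_assoc] at this
            have h2 : p ∣ c * (g.headD 0 * inv - 1) := hinv.mul_left c
            have hcd : p ∣ c := by
              have heq : c = c * (g.headD 0 * inv) - c * (g.headD 0 * inv - 1) := by ring
              rw [heq]; exact dvd_sub h1 h2
            have := (PySem.Int.mod_eq_zero_iff_dvd c p).mpr hcd
            rw [hcred] at this
            exact hc this
          -- unfold one A iteration
          rw [np_cons_ne hh]
          have hcond : ((h :: t) ≠ [0] ∧ g.length ≤ (h :: t).length) :=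
            ⟨by simp [hh], by simp; omega⟩
          simp only [aLoop]
          rw [if_pos hcond, if_neg hg0]
          rw [← hinveq]
          simp only [List.headD_cons, List.length_cons, ← hcdef]
          set k := t.length + 1 - g.length with hkdef
          have htp : normPoly (c :: List.replicate k 0) = c :: List.replicate k 0 :=
            np_cons_ne hc _
          rw [htp]
          have htnz : (c :: List.replicate k 0) ≠ [0] := by
            intro hx
            exact hc (by simpa using (List.cons_eq_cons.mp hx).1)
          have hklen : k + 2 ≤ q.length := by omega
          rw [suma_eq_addQ hp hq0 hqne hqred (by simp; omega) htnz]
          have hrs := resta_step (c := c) (g := g) (rf := h :: t) (k := k) hp hgne hgnz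
            (by simp; omega) hc hcred (by simpa using hcg) hcg0
          rw [hrs]
          simp only [List.tail_cons]
          rw [red_map_id (fun x hx => hred x (by simp [hx]))]
          -- B side
          have hB : bLoopF g p inv (fb' + 1) (h :: t)
              = (c :: (bLoopF g p inv fb' (bSub t g.tail c p)).1,
                 (bLoopF g p inv fb' (bSub t g.tail c p)).2) := by
            simp only [bLoopF, if_neg hnm, ← hcdef, if_neg hc]
          rw [hB]
          -- the inner loop via the induction hypothesis
          have hbsl : (bSub t g.tail c p).length = t.length := bSub_length _ _ _ _
          have hq'len : (addQ p q (c :: List.replicate k 0)).length = q.length :=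
            addQ_length (by simp; omega)
          have hq'head : (addQ p q (c :: List.replicate k 0)).headD 0 = q.headD 0 := by
            rw [addQ_head (by simp; omega)]; simp
          have hihres := ih t.length (by omega) (bSub t g.tail c p)
            (addQ p q (c :: List.replicate k 0)) fuel' fb' hbsl (by omega)
            (bSub_red hp c t g.tail (fun x hx => hred x (by simp [hx])))
            (by omega)
            (by intro hx; rw [hx] at hq'len; simp at hq'len; omega)
            (by rw [hq'head]; exact hq0)
            (addQ_red hp hqred _)
            (by omega)
          rw [hihres]
          have hbqlen : (bLoopF g p inv fb' (bSub t g.tail c p)).1.length = k := by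
            rw [bq_length hm1 p inv fb' _ (by omega)]
            omega
          rw [addQ_step hqred hbqlen hklen]

-- ---------- correctness of pyInvMod ----------

theorem egcdF_spec : ∀ (fuel a b : Nat), a ≤ fuel →
    (egcdF fuel a b).1 = (Nat.gcd a b : Int) ∧
      (egcdF fuel a b).2.1 * a + (egcdF fuel a b).2.2 * b = (egcdF fuel a b).1 := by
  intro fuel
  induction fuel with
  | zero =>
    intro a b h
    have : a = 0 := by omega
    subst this
    simp [egcdF]
  | succ fuel ih =>
    intro a b h
    cases a with
    | zero => simp [egcdF]
    | succ a' =>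
      have hrec := ih (b % (a' + 1)) (a' + 1)
        (by have := Nat.mod_lt b (show 0 < a' + 1 by omega); omega)
      obtain ⟨h1, h2⟩ := hrec
      simp only [egcdF]
      refine ⟨by rw [h1, Nat.gcd_rec (a' + 1) b], ?_⟩
      have hdm := Nat.div_add_mod b (a' + 1)
      have hmod : ((b % (a' + 1) : Nat) : Int)
          = (b : Int) - ((b : Int) / ((a' + 1 : Nat) : Int)) * ((a' + 1 : Nat) : Int) := by
        push_cast
        rw [Int.emod_def]
        ring
      rw [hmod] at h2
      rw [h1] at h2 ⊢
      push_cast at h2 ⊢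
      linear_combination h2

theorem inv_correct (a p : Int) (hp2 : 2 ≤ p.natAbs) (hgcd : Int.gcd a p = 1) :
    p ∣ (a * pyInvMod a p - 1) := by
  have hp : p ≠ 0 := by intro h; rw [h] at hp2; simp at hp2
  have hn0 : ¬ (p.natAbs = 0) := by omega
  have hnpos : (0 : Int) < (p.natAbs : Int) := by
    have : 0 < p.natAbs := by omega
    exact_mod_cast this
  have hdvd_n : p ∣ ((p.natAbs : Nat) : Int) := Int.dvd_natAbs.mpr dvd_rfl
  have hmodnn := PySem.Int.mod_nonneg a hnpos
  have ha'cast : (((PySem.Int.mod a (p.natAbs : Int)).toNat : Nat) : Int)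
      = PySem.Int.mod a ((p.natAbs : Nat) : Int) := Int.toNat_of_nonneg hmodnn
  have h3 : Int.gcd a ((p.natAbs : Nat) : Int) = Int.gcd a p := by
    unfold Int.gcd
    rw [Int.natAbs_natCast]
  -- gcd is preserved by the upfront reduction mod |p|
  have hgcd2 : Nat.gcd (PySem.Int.mod a (p.natAbs : Int)).toNat p.natAbs = 1 := by
    have hfd := PySem.Int.floordiv_mul_add_mod a ((p.natAbs : Nat) : Int)
    have heq : PySem.Int.mod a ((p.natAbs : Nat) : Int)
        = a + (-(PySem.Int.floordiv a ((p.natAbs : Nat) : Int))) * ((p.natAbs : Nat) : Int) := by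
      linarith
    have h2 : Int.gcd (((PySem.Int.mod a (p.natAbs : Int)).toNat : Nat) : Int)
        ((p.natAbs : Nat) : Int) = Int.gcd a ((p.natAbs : Nat) : Int) := by
      rw [ha'cast, heq]
      exact Int.gcd_add_mul_right_left _ a _
    rw [Int.gcd_natCast_natCast, h3, hgcd] at h2
    exact h2
  have hs := egcdF_spec (PySem.Int.mod a (p.natAbs : Int)).toNat
    (PySem.Int.mod a (p.natAbs : Int)).toNat p.natAbs (le_refl _)
  have hg1 : (egcd (PySem.Int.mod a (p.natAbs : Int)).toNat p.natAbs).1 = 1 := by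
    unfold egcd
    rw [hs.1, hgcd2]
    rfl
  have hbez : (egcd (PySem.Int.mod a (p.natAbs : Int)).toNat p.natAbs).2.1
        * (((PySem.Int.mod a (p.natAbs : Int)).toNat : Nat) : Int)
      + (egcd (PySem.Int.mod a (p.natAbs : Int)).toNat p.natAbs).2.2
        * ((p.natAbs : Nat) : Int) = 1 := by
    unfold egcd
    rw [hs.2, hs.1, hgcd2]
    rfl
  unfold pyInvMod
  rw [if_neg hn0]
  simp only []
  rw [if_pos hg1]
  set x := (egcd (PySem.Int.mod a (p.natAbs : Int)).toNat p.natAbs).2.1 with hxdef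
  set y := (egcd (PySem.Int.mod a (p.natAbs : Int)).toNat p.natAbs).2.2 with hydef
  have d1 : p ∣ (PySem.Int.mod x p - x) := pv_dvd_mod_sub x p
  have d2 : p ∣ ((((PySem.Int.mod a (p.natAbs : Int)).toNat : Nat) : Int) - a) := by
    rw [ha'cast]
    have hfd := PySem.Int.floordiv_mul_add_mod a ((p.natAbs : Nat) : Int)
    have heq : PySem.Int.mod a ((p.natAbs : Nat) : Int) - a
        = (-(PySem.Int.floordiv a ((p.natAbs : Nat) : Int))) * ((p.natAbs : Nat) : Int) := by
      linarith
    rw [heq]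
    exact hdvd_n.mul_left _
  have d3 : p ∣ (y * ((p.natAbs : Nat) : Int)) := hdvd_n.mul_left y
  have heq : a * PySem.Int.mod x p - 1
      = a * (PySem.Int.mod x p - x)
        - x * ((((PySem.Int.mod a (p.natAbs : Int)).toNat : Nat) : Int) - a)
        + (x * (((PySem.Int.mod a (p.natAbs : Int)).toNat : Nat) : Int)
            + y * ((p.natAbs : Nat) : Int) - 1)
        - y * ((p.natAbs : Nat) : Int) := by ring
  rw [heq, hbez]
  simp only [sub_self, add_zero]
  exact dvd_sub (dvd_sub (d1.mul_left a) (d2.mul_left x)) d3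

-- ===== VERDICT (by name: the statement is the Claim_ definition above) =====
theorem div_poli_spec : Claim_equal_div_poli := by
  intro f g p hdom hpre
  unfold Spec_div_poli
  obtain ⟨hgne, hgnz, hcases⟩ := hpre
  have hm1 : 1 ≤ g.length := by
    cases g with
    | nil => exact absurd rfl hgne
    | cons a t => simp
  unfold div_poli div_poli_alt
  rw [if_neg hgnz, if_neg hgnz]
  by_cases hflt : f.length < g.length
  · -- no iteration on either side
    rw [if_pos hflt]
    have hcond : ¬ (f ≠ [0] ∧ g.length ≤ f.length) := by rintro ⟨-, h⟩; omega
    simp [aLoop, hcond]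
  · rw [if_neg hflt]
    simp only []
    rcases hcases with h | ⟨hp2, hgcd, hfz⟩
    · exact absurd h hflt
    have hp : p ≠ 0 := by intro h; rw [h] at hp2; simp at hp2
    have hinv : p ∣ (g.headD 0 * pyInvMod (g.headD 0) p - 1) :=
      inv_correct (g.headD 0) p hp2 hgcd
    have hg0 : g.headD 0 ≠ 0 := by
      intro h
      rw [h] at hinv
      have h1 : p ∣ (1 : Int) := by simpa using (dvd_neg.mpr hinv)
      have h2 : p.natAbs ∣ (1 : Int).natAbs := Int.natAbs_dvd_natAbs.mpr h1
      simp at h2; omega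
    have hkill : ∀ x : Int, p ∣ x * pyInvMod (g.headD 0) p → p ∣ x := by
      intro x hx
      have h1 : p ∣ x * pyInvMod (g.headD 0) p * g.headD 0 := hx.mul_right _
      have h2 : p ∣ x * (g.headD 0 * pyInvMod (g.headD 0) p - 1) := hinv.mul_left x
      have heq : x = x * pyInvMod (g.headD 0) p * g.headD 0
          - x * (g.headD 0 * pyInvMod (g.headD 0) p - 1) := by ring
      rw [heq]; exact dvd_sub h1 h2
    by_cases hf0 : f = [0]
    · -- f = [0] and g a single invertible coefficient: both return ([0], [0])
      subst hf0
      have hm : g.length = 1 := by simp at hflt; omega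
      have hcond : ¬ (([0] : List Int) ≠ [0] ∧ g.length ≤ ([0] : List Int).length) := by
        simp
      have hA : aLoop g p (([0] : List Int).length + 1) [0] [0] = ([0], [0]) := by
        simp [aLoop, hcond]
      rw [hA]
      have hmap : ([0] : List Int).map (fun c => PySem.Int.mod c p) = [0] := by
        simp [pv_mod_zero]
      rw [hmap]
      have hB : bLoopF g p (pyInvMod (g.headD 0) p) ([0] : List Int).length [0]
          = ([0], []) := by
        simp [bLoopF, hm, pv_mod_zero]
      unfold bLoop
      rw [hB]
      rfl
    · -- the generic first division step, on the raw (unreduced) f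
      have hfm : PySem.Int.mod (f.headD 0) p ≠ 0 := hfz.resolve_left hf0
      obtain ⟨f0, ft, rfl⟩ : ∃ a t, f = a :: t := by
        cases f with
        | nil => exact absurd (by simpa using hm1) hflt
        | cons a t => exact ⟨a, t, rfl⟩
      simp only [List.headD_cons] at hfm
      have hf0ne : f0 ≠ 0 := by
        intro h; rw [h, pv_mod_zero] at hfm; exact hfm rfl
      set inv := pyInvMod (g.headD 0) p with hinvdef
      set c := PySem.Int.mod (f0 * inv) p with hcdef
      have hc : c ≠ 0 := by
        intro h0
        rw [hcdef] at h0
        have hd := hkill f0 ((PySem.Int.mod_eq_zero_iff_dvd _ p).mp h0)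
        have := (PySem.Int.mod_eq_zero_iff_dvd f0 p).mpr hd
        exact hfm this
      have hcred : PySem.Int.mod c p = c := pv_mod_idem hp _
      have hcg : p ∣ (c * g.headD 0 - f0) := by
        have h1 : p ∣ (c - f0 * inv) := by
          rw [hcdef]; exact pv_dvd_mod_sub (f0 * inv) p
        have h2 : p ∣ f0 * (g.headD 0 * inv - 1) := hinv.mul_left f0
        have heq : c * g.headD 0 - f0
            = (c - f0 * inv) * g.headD 0 + f0 * (g.headD 0 * inv - 1) := by ring
        rw [heq]; exact dvd_add (h1.mul_right _) h2
      have hcg0 : PySem.Int.mod (c * g.headD 0) p ≠ 0 := by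
        intro h0
        have hd := (PySem.Int.mod_eq_zero_iff_dvd _ p).mp h0
        have h1 : p ∣ c * (g.headD 0 * inv) := by
          have := hd.mul_right inv; rwa [mul_assoc] at this
        have h2 : p ∣ c * (g.headD 0 * inv - 1) := hinv.mul_left c
        have hcd : p ∣ c := by
          have heq : c = c * (g.headD 0 * inv) - c * (g.headD 0 * inv - 1) := by ring
          rw [heq]; exact dvd_sub h1 h2
        have := (PySem.Int.mod_eq_zero_iff_dvd c p).mpr hcd
        rw [hcred] at this
        exact hc this
      -- unfold the first A iteration
      have hcond : ((f0 :: ft) ≠ [0] ∧ g.length ≤ (f0 :: ft).length) :=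
        ⟨by simp [hf0ne], by simp at hflt ⊢; omega⟩
      simp only [aLoop]
      rw [if_pos hcond, if_neg hg0]
      rw [← hinvdef]
      simp only [List.headD_cons, List.length_cons, ← hcdef]
      set k := ft.length + 1 - g.length with hkdef
      rw [np_cons_ne hc]
      have hq1 : sumaPoli [0] (c :: List.replicate k 0) p = c :: List.replicate k 0 := by
        simp [sumaPoli]
      rw [hq1]
      have hrs := resta_step (c := c) (g := g) (rf := f0 :: ft) (k := k) hp hgne hgnz
        (by simp at hflt ⊢; omega) hc hcred (by simpa using hcg) hcg0
      rw [hrs]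
      simp only [List.tail_cons]
      -- unfold the first B iteration
      have hmap : (f0 :: ft).map (fun x => PySem.Int.mod x p)
          = PySem.Int.mod f0 p :: ft.map (fun x => PySem.Int.mod x p) := by
        simp
      have hcB : PySem.Int.mod (PySem.Int.mod f0 p * inv) p = c := by
        rw [hcdef]
        apply pv_mod_congr hp
        have heq : PySem.Int.mod f0 p * inv - f0 * inv
            = (PySem.Int.mod f0 p - f0) * inv := by ring
        rw [heq]
        exact (pv_dvd_mod_sub f0 p).mul_right inv
      unfold bLoop
      rw [hmap]
      have hBlen : (PySem.Int.mod f0 p :: ft.map (fun x => PySem.Int.mod x p)).length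
          = ft.length + 1 := by simp
      rw [hBlen]
      have hB : bLoopF g p inv (ft.length + 1)
            (PySem.Int.mod f0 p :: ft.map (fun x => PySem.Int.mod x p))
          = (c :: (bLoopF g p inv ft.length
                (bSub (ft.map (fun x => PySem.Int.mod x p)) g.tail c p)).1,
             (bLoopF g p inv ft.length
                (bSub (ft.map (fun x => PySem.Int.mod x p)) g.tail c p)).2) := by
        simp only [bLoopF, List.length_map, hcB]
        rw [if_neg (by simp at hflt ⊢; omega), if_neg hc]
      rw [hB]
      -- the rest of both loops agree, by loop_eq
      have hbsl : (bSub (ft.map (fun x => PySem.Int.mod x p)) g.tail c p).length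
          = ft.length := by rw [bSub_length]; simp
      have hle := loop_eq g p inv hp2 hgne hgnz hinvdef hinv ft.length
        (bSub (ft.map (fun x => PySem.Int.mod x p)) g.tail c p)
        (c :: List.replicate k 0) (ft.length + 1) ft.length
        hbsl (le_refl _)
        (bSub_red hp c _ g.tail (red_map hp ft))
        (le_refl _)
        (by simp)
        (by simp [hc])
        (by
          intro x hx
          rcases List.mem_cons.mp hx with rfl | hx
          · exact hcred
          · rw [List.eq_of_mem_replicate hx]; exact pv_mod_zero p)
        (by simp at hflt ⊢; omega)
      rw [hle]
      have hbqlen : (bLoopF g p inv ft.length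
            (bSub (ft.map (fun x => PySem.Int.mod x p)) g.tail c p)).1.length = k := by
        rw [bq_length hm1 p inv ft.length _ (le_of_eq hbsl), hbsl]
      rw [addQ_final hbqlen (bq_red hp g inv ft.length _)]
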